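-- pv_equiv track=rewrite | github.com/momolaikankan/tsy1 | l/l9.py | func
-- ===== SOURCE A (Python) =====
-- def func(s,c):
--     lis = []
--     for i in range(len(s)):
--         if s[i] == 'e':
--             lis.append(i)
--     lis1 = []
--     for i in range(len(s)):
--         kk = min([abs(i-j) for j in lis])
--         lis1.append(kk)
--     return lis1
-- ===== SOURCE B (Python) =====
-- def func(s, c):
--     n = len(s)
--     left = []
--     d = n  # sentinel exceeding any real distance
--     for ch in s:
--         d = 0 if ch == 'e' else d + 1
--         left.append(d)
--     right = [0] * n
--     d = n
--     for i in range(n - 1, -1, -1):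
--         d = 0 if s[i] == 'e' else d + 1
--         right[i] = d
--     return [min(a, b) for a, b in zip(left, right)]
-- ===== Notes on version B (the rewrite author's own statement) =====
-- stated objective: faster
-- what changed: Replaced the per-index scan over all 'e' positions with two linear sweeps (left-to-right and right-to-left) carrying the running distance to the last seen 'e', combined by a pointwise min.
import Mathlib
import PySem

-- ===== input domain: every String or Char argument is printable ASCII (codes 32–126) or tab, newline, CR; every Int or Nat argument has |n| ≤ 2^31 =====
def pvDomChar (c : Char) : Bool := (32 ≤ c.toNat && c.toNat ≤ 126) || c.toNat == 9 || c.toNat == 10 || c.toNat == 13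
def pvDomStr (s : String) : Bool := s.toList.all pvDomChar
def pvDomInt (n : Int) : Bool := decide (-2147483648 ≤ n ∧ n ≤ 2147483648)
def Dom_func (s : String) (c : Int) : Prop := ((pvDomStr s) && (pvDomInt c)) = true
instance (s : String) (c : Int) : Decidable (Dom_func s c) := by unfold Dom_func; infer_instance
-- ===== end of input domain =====

-- B replaces A's O(n·k) per-index scan over all 'e'-positions by two O(n) sweeps
-- carrying the running distance to the last 'e', combined pointwise by min.

-- ===== PORT A =====
def func (s : String) (c : Int) : List Int :=
  let lis : List Int :=
    (PySem.List.pyRange 0 (PySem.Str.len s) 1).foldl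
      (fun acc i => if PySem.Str.pyGet? s i = some 'e' then acc ++ [i] else acc) []
  (PySem.List.pyRange 0 (PySem.Str.len s) 1).foldl
    (fun acc i =>
      -- min([...]) raises ValueError on an empty list; `none` is excluded by Pre_func
      acc ++ [(PySem.List.min? (lis.map (fun j => |i - j|)) (fun x => x)).getD 0]) []

-- ===== PORT B =====
def func_alt (s : String) (c : Int) : List Int :=
  let l := s.toList
  let n : Int := (l.length : Int)
  let left := (l.foldl
    (fun (st : Int × List Int) ch =>
      let d := if ch = 'e' then 0 else st.1 + 1
      (d, st.2 ++ [d])) (n, [])).2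
  let right := ((l.reverse.foldl
    (fun (st : Int × List Int) ch =>
      let d := if ch = 'e' then 0 else st.1 + 1
      (d, st.2 ++ [d])) (n, [])).2).reverse
  List.zipWith (fun a b => if a ≤ b then a else b) left right

-- ===== PRECONDITION & SPEC =====
-- Pre_ excludes exactly the non-empty strings with no 'e': there A's min([]) raises ValueError.
def Pre_func (s : String) (c : Int) : Prop := s.toList = [] ∨ 'e' ∈ s.toList
instance (s : String) (c : Int) : Decidable (Pre_func s c) := by unfold Pre_func; infer_instance
def pvWitness_func : String × Int := ("bee f", 0)

def Spec_func (s : String) (c : Int) (out : List Int) : Prop := out = func_alt s c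
instance (s : String) (c : Int) (out : List Int) : Decidable (Spec_func s c out) := by unfold Spec_func; infer_instance

-- ===== CLAIM (what is proved, stated in full; the proofs are below) =====
def Claim_equal_func : Prop := ∀ (s : String) (c : Int), Dom_func s c → Pre_func s c → Spec_func s c (func s c)

-- ===== LEMMAS AND PROOFS =====

-- the left-to-right sweep as a pure list function
def lds (d : Int) : List Char → List Int
  | [] => []
  | ch :: t => let d' := if ch = 'e' then 0 else d + 1; d' :: lds d' t

-- candidate distances from index i back to each 'e' at position j ≤ i
def cands (l : List Char) (i : Nat) : List Int :=
  (List.range (i + 1)).filterMap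
    (fun j => if l.getD j ' ' = 'e' then some ((i : Int) - j) else none)

-- the positions of 'e' as Ints, in order (A's `lis`)
def epos (l : List Char) : List Int :=
  ((List.range l.length).filter (fun j => l.getD j ' ' = 'e')).map (fun (j : Nat) => (j : Int))

lemma sweep_eq (l : List Char) (d : Int) (acc : List Int) :
    (l.foldl (fun (st : Int × List Int) ch =>
        let d' := if ch = 'e' then 0 else st.1 + 1
        (d', st.2 ++ [d'])) (d, acc)).2 = acc ++ lds d l := by
  induction l generalizing d acc with
  | nil => simp [lds]
  | cons ch t ih => simp [lds, ih]

lemma lds_length (d : Int) (l : List Char) : (lds d l).length = l.length := by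
  induction l generalizing d with
  | nil => rfl
  | cons ch t ih => simp [lds, ih]

lemma cands_cons (ch : Char) (t : List Char) (k : Nat) :
    cands (ch :: t) (k + 1)
      = (if ch = 'e' then [(((k : Nat) + 1 : Nat) : Int)] else []) ++ cands t k := by
  unfold cands
  rw [List.range_succ_eq_map, List.filterMap_cons, List.filterMap_map]
  have hfm : (List.range (k+1)).filterMap
      ((fun j => if (ch :: t).getD j ' ' = 'e' then some (((k+1 : Nat) : Int) - j) else none) ∘ Nat.succ)
      = (List.range (k+1)).filterMap (fun j => if t.getD j ' ' = 'e' then some ((k : Int) - j) else none) := by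
    apply List.filterMap_congr
    intro j hj
    simp [Function.comp, Nat.succ_eq_add_one]
  rw [hfm]
  by_cases he : ch = 'e' <;> simp [he]

lemma lds_getD (l : List Char) (i : Nat) (d : Int) (hd : 0 ≤ d) (hi : i < l.length) :
    (lds d l).getD i 0 = (cands l i).foldl min (d + i + 1) := by
  induction l generalizing i d with
  | nil => simp at hi
  | cons ch t ih =>
    cases i with
    | zero =>
      simp only [lds, cands]
      by_cases he : ch = 'e'
      · simp [he]; omega
      · simp [he]
    | succ k =>
      have hk : k < t.length := by simpa using hi
      have hstep : (lds d (ch :: t)).getD (k+1) 0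
          = (lds (if ch = 'e' then 0 else d + 1) t).getD k 0 := by
        simp [lds]
      rw [hstep, cands_cons, List.foldl_append]
      by_cases he : ch = 'e'
      · rw [if_pos he, if_pos he, ih k 0 le_rfl hk]
        simp only [List.foldl_cons, List.foldl_nil]
        congr 1
        push_cast
        rw [min_def]
        split_ifs with h
        · omega
        · omega
      · rw [if_neg he, if_neg he, ih k (d + 1) (by omega) hk]
        simp only [List.foldl_nil]
        congr 1
        push_cast
        ring

lemma lis_eq (s : String) :
    (PySem.List.pyRange 0 (PySem.Str.len s) 1).foldl
      (fun acc i => if PySem.Str.pyGet? s i = some 'e' then acc ++ [i] else acc) []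
      = epos s.toList := by
  rw [PySem.List.foldl_append_ite_eq_filter, PySem.Str.len_eq, PySem.List.pyRange_one]
  unfold epos
  simp only [Int.sub_zero, Int.toNat_natCast, List.nil_append, zero_add]
  rw [List.filter_map]
  refine congrArg (List.map fun (j : Nat) => (j : Int)) (List.filter_congr ?_)
  intro j hj
  have hj' : j < s.toList.length := List.mem_range.mp hj
  simp [List.getElem?_eq_getElem hj']

lemma func_eq (s : String) (c : Int) :
    func s c = (PySem.List.pyRange 0 (PySem.Str.len s) 1).map (fun i =>
      (PySem.List.min? ((epos s.toList).map (fun j => |i - j|)) (fun x => x)).getD 0) := by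
  unfold func
  rw [lis_eq, PySem.List.foldl_append_singleton_eq_map]
  simp only [List.nil_append]

lemma mem_cands {l : List Char} {i : Nat} {x : Int} :
    x ∈ cands l i ↔ ∃ j : Nat, j ≤ i ∧ l.getD j ' ' = 'e' ∧ x = (i : Int) - j := by
  simp [cands, List.mem_filterMap, List.mem_range]
  constructor <;> rintro ⟨j, hj, he, hx⟩ <;> exact ⟨j, hj, he, hx.symm⟩

lemma mem_epos {l : List Char} {x : Int} :
    x ∈ epos l ↔ ∃ j : Nat, j < l.length ∧ l.getD j ' ' = 'e' ∧ x = (j : Int) := by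
  simp [epos, List.mem_filter, List.mem_range]
  constructor
  · rintro ⟨j, ⟨hj, he⟩, hx⟩; exact ⟨j, hj, he, by omega⟩
  · rintro ⟨j, hj, he, hx⟩; exact ⟨j, ⟨hj, he⟩, by omega⟩

lemma pointwise (l : List Char) (k : Nat) (hk : k < l.length) (hne : 'e' ∈ l) :
    (PySem.List.min? ((epos l).map (fun j => |(k : Int) - j|)) (fun x => x)).getD 0
      = (if (lds (l.length : Int) l).getD k 0 ≤ ((lds (l.length : Int) l.reverse).reverse).getD k 0
         then (lds (l.length : Int) l).getD k 0
         else ((lds (l.length : Int) l.reverse).reverse).getD k 0) := by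
  set n := l.length with hn
  -- a position of 'e'
  obtain ⟨j0, hj0n, hj0e⟩ : ∃ j0 : Nat, j0 < n ∧ l.getD j0 ' ' = 'e' := by
    obtain ⟨j0, hj0, he⟩ := List.getElem_of_mem hne
    exact ⟨j0, hj0, by rw [List.getD_eq_getElem _ _ hj0, he]⟩
  -- dists is nonempty
  have hEmem : ((j0 : Nat) : Int) ∈ epos l := mem_epos.mpr ⟨j0, hj0n, hj0e, rfl⟩
  have hdne : ((epos l).map (fun j => |(k : Int) - j|)) ≠ [] := by
    intro h; rw [List.map_eq_nil_iff] at h; rw [h] at hEmem; simp at hEmem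
  obtain ⟨m, hm⟩ : ∃ m, PySem.List.min? ((epos l).map (fun j => |(k : Int) - j|)) (fun x => x) = some m := by
    rcases h : PySem.List.min? ((epos l).map (fun j => |(k : Int) - j|)) (fun x => x) with _ | m
    · exact absurd ((PySem.List.min?_eq_none_iff _ _).mp h) hdne
    · exact ⟨m, rfl⟩
  have hmmem := PySem.List.min?_mem hm
  have hmmin := PySem.List.min?_isMin hm
  rw [hm, Option.getD_some]
  -- characterise L and R
  have hL : (lds (n : Int) l).getD k 0 = (cands l k).foldl min ((n : Int) + k + 1) :=
    lds_getD l k n (by positivity) hk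
  have hRlen : (lds (n : Int) l.reverse).length = n := by rw [lds_length]; simp [hn]
  have hR : ((lds (n : Int) l.reverse).reverse).getD k 0
      = (cands l.reverse (n - 1 - k)).foldl min ((n : Int) + ((n - 1 - k : Nat) : Int) + 1) := by
    rw [List.getD_eq_getElem _ _ (by simp [hRlen]; omega), List.getElem_reverse]
    simp only [hRlen]
    rw [← List.getD_eq_getElem _ (0 : Int) (by omega)]
    exact lds_getD l.reverse (n - 1 - k) n (by positivity) (by simp [hn]; omega)
  rw [hL, hR]
  have hm_le : ∀ j : Nat, j < n → l.getD j ' ' = 'e' → m ≤ |(k : Int) - j| := by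
    intro j hj he
    exact hmmin _ (List.mem_map_of_mem (mem_epos.mpr ⟨j, hj, he, rfl⟩))
  obtain ⟨x, hxE, hxm⟩ := List.mem_map.mp hmmem
  obtain ⟨j1, hj1n, hj1e, hj1x⟩ := mem_epos.mp hxE
  subst hj1x

  -- m is a genuine distance, hence < n
  have hmlt : m < (n : Int) := by
    rcases abs_cases ((k : Int) - j1) with ⟨h1, h2⟩ | ⟨h1, h2⟩ <;> omega
  have hrevD : ∀ j' : Nat, j' < n → l.reverse.getD j' ' ' = l.getD (n - 1 - j') ' ' := by
    intro j' hj'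
    rw [List.getD_eq_getElem _ _ (by simpa [hn] using hj'), List.getElem_reverse,
        List.getD_eq_getElem _ _ (by omega)]
  -- m ≤ left sweep value
  have hmA : m ≤ (cands l k).foldl min ((n : Int) + k + 1) := by
    rcases PySem.List.foldl_min_mem (cands l k) ((n : Int) + k + 1) with h | h
    · omega
    · obtain ⟨j, hjk, hje, hjx⟩ := mem_cands.mp h
      have := hm_le j (by omega) hje
      rw [abs_of_nonneg (by omega : (0:Int) ≤ (k : Int) - j)] at this
      omega
  -- m ≤ right sweep value
  have hmB : m ≤ (cands l.reverse (n - 1 - k)).foldl min ((n : Int) + ((n - 1 - k : Nat) : Int) + 1) := by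
    rcases PySem.List.foldl_min_mem (cands l.reverse (n - 1 - k)) ((n : Int) + ((n - 1 - k : Nat) : Int) + 1) with h | h
    · omega
    · obtain ⟨j', hj', hje, hjx⟩ := mem_cands.mp h
      rw [hrevD j' (by omega)] at hje
      have := hm_le (n - 1 - j') (by omega) hje
      rw [abs_of_nonpos (by omega : (k : Int) - ((n - 1 - j' : Nat) : Int) ≤ 0)] at this
      omega
  -- one of the two sweep values is ≤ m
  have hone : (cands l k).foldl min ((n : Int) + k + 1) ≤ m
      ∨ (cands l.reverse (n - 1 - k)).foldl min ((n : Int) + ((n - 1 - k : Nat) : Int) + 1) ≤ m := by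
    by_cases hj1k : j1 ≤ k
    · left
      have hmem : (k : Int) - j1 ∈ cands l k := mem_cands.mpr ⟨j1, hj1k, hj1e, rfl⟩
      have := (PySem.List.foldl_min_le (cands l k) ((n : Int) + k + 1)).2 _ hmem
      rcases abs_cases ((k : Int) - j1) with ⟨h1, h2⟩ | ⟨h1, h2⟩ <;> omega
    · right
      have hmem : ((n - 1 - k : Nat) : Int) - ((n - 1 - j1 : Nat) : Int)
          ∈ cands l.reverse (n - 1 - k) := by
        refine mem_cands.mpr ⟨n - 1 - j1, by omega, ?_, rfl⟩
        rw [hrevD (n - 1 - j1) (by omega)]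
        have : n - 1 - (n - 1 - j1) = j1 := by omega
        rw [this]; exact hj1e
      have := (PySem.List.foldl_min_le (cands l.reverse (n - 1 - k)) ((n : Int) + ((n - 1 - k : Nat) : Int) + 1)).2 _ hmem
      rcases abs_cases ((k : Int) - j1) with ⟨h1, h2⟩ | ⟨h1, h2⟩ <;> omega
  rcases hone with h1 | h1 <;> split_ifs with h2 <;> omega

lemma funcAlt_eq (s : String) (c : Int) :
    func_alt s c = List.zipWith (fun a b => if a ≤ b then a else b)
      (lds (s.toList.length : Int) s.toList)
      ((lds (s.toList.length : Int) s.toList.reverse).reverse) := by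
  simp only [func_alt]
  rw [sweep_eq, sweep_eq]
  simp

-- ===== VERDICT (by name: the statement is the Claim_ definition above) =====
theorem func_spec : Claim_equal_func := by
  intro s c _hDom hPre
  unfold Spec_func
  rw [func_eq, funcAlt_eq]
  rcases hPre with h0 | hne
  · simp [h0, lds, PySem.Str.len_eq]
  · apply List.ext_getElem
    · simp [PySem.List.length_pyRange_one, PySem.Str.len_eq, lds_length]
    · intro k hk1 hk2
      have hk : k < s.toList.length := by
        simpa [PySem.List.length_pyRange_one, PySem.Str.len_eq] using hk1
      have hP := pointwise s.toList k hk hne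
      have hlen1 : k < (lds (s.toList.length : Int) s.toList).length := by
        rw [lds_length]; exact hk
      have hlen2 : k < ((lds (s.toList.length : Int) s.toList.reverse).reverse).length := by
        simp [lds_length]; exact hk
      rw [List.getD_eq_getElem _ _ hlen1, List.getD_eq_getElem _ _ hlen2] at hP
      simp only [List.getElem_map, List.getElem_zipWith, PySem.Str.len_eq,
        PySem.List.getElem_pyRange_one, zero_add]
      exact hP
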